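-- pv_equiv track=rewrite | github.com/DenisKhmelnov/SP-CW-3 | utils.py | parse_hash_tag
-- ===== SOURCE A (Python) =====
-- def parse_hash_tag(post: dict):
--     """
--     :param post:
--     :return: возвращает пост, где хэштеги заменены на html ссылку
--     """
--     words_list = post["content"].split(" ")
--     parsed_content = []
--     for word in words_list:
--         if word.startswith("#"):
--             html_replacement = f'<a href="/tag/{word[1:]}">{word}</a>'
--             parsed_content.append(html_replacement)
--         else:
--             parsed_content.append(word)
--     post["content"] = " ".join(parsed_content)
--     return post
-- ===== SOURCE B (Python) =====
-- def parse_hash_tag(post: dict):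
--     """Single pass over the characters (no split/join of a word list); mutates post like A."""
--     content = post["content"]
--     n = len(content)
--     out = []
--     i = 0
--     at_start = True  # at the start of a space-delimited token
--     while i < n:
--         c = content[i]
--         if at_start and c == '#':
--             j = i + 1
--             while j < n and content[j] != ' ':
--                 j += 1
--             tag = content[i + 1:j]
--             out.append(f'<a href="/tag/{tag}">#{tag}</a>')
--             i = j
--             at_start = False
--         else:
--             out.append(c)
--             at_start = c == ' '
--             i += 1
--     post["content"] = ''.join(out)
--     return post
-- ===== Notes on version B (the rewrite author's own statement) =====
-- stated objective: alternative
-- what changed: Replaces A's split(" ")/per-word loop/" ".join pipeline with a single character-level pass over the content that detects hashtag tokens at space boundaries and emits the anchor in place; both mutate post['content'] in place identically.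
-- outside the precondition, e.g. on parse_hash_tag({}): A raises KeyError, B raises KeyError
import Mathlib
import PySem

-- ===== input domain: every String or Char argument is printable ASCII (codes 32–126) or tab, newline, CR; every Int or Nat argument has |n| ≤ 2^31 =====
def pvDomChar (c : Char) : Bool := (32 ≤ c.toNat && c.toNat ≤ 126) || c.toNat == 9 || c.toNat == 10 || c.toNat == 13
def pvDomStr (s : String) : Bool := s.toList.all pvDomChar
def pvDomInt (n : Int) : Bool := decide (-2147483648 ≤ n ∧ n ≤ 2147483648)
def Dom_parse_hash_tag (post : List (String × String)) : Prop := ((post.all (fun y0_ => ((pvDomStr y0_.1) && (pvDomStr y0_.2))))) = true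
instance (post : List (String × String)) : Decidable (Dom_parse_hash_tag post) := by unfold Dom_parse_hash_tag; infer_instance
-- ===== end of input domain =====

-- B replaces A's split(" ")/loop/join with a single character-level pass over the content; the equivalence is about the
-- RETURN value (the Python A mutates post["content"] in place; the Python B performs the same mutation).

-- ===== PORT A =====
def parse_hash_tag (post : List (String × String)) : List (String × String) :=
  let d := PySem.Dict.ofList post
  match d.get? "content" with
  | none => []   -- KeyError: post["content"] missing; excluded by Pre_
  | some content =>
    -- words_list = post["content"].split(" ")
    let words_list := (PySem.Chars.splitOn content.toList [' ']).map String.ofList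
    -- loop appending either the html replacement or the word
    let parsed_content := words_list.foldl (fun acc word =>
      if PySem.Str.startswith word "#" then
        acc ++ ["<a href=\"/tag/" ++ PySem.Str.slice word (some 1) none ++ "\">" ++ word ++ "</a>"]
      else acc ++ [word]) []
    -- post["content"] = " ".join(parsed_content); return post
    (d.insert "content" (PySem.Str.join " " parsed_content)).items

-- ===== PORT B =====
-- the anchor built for a hashtag token whose text after '#' is `tag`
def phtAnchor (tag : List Char) : List Char :=
  "<a href=\"/tag/".toList ++ tag ++ "\">#".toList ++ tag ++ "</a>".toList

-- the while loop of Source B: one pass; `st` = at_start (start of string or just after a space)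
def phtScan : Bool → List Char → List Char
  | _, [] => []
  | st, c :: r =>
    if st && c == '#' then
      phtAnchor (r.takeWhile (· != ' ')) ++ phtScan false (r.dropWhile (· != ' '))
    else
      c :: phtScan (c == ' ') r
termination_by _ cs => cs.length
decreasing_by
· exact Nat.lt_succ_of_le (List.length_dropWhile_le _ _)
· exact Nat.lt_succ_self _

def parse_hash_tag_alt (post : List (String × String)) : List (String × String) :=
  let d := PySem.Dict.ofList post
  match d.get? "content" with
  | none => []   -- KeyError in Source B as well
  | some content =>
    (d.insert "content" (String.ofList (phtScan true content.toList))).items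

-- ===== PRECONDITION & SPEC =====
-- Pre_ excludes exactly the inputs with no "content" key, on which both Pythons raise KeyError.
def Pre_parse_hash_tag (post : List (String × String)) : Prop :=
  (PySem.Dict.ofList post).contains "content" = true
instance (post : List (String × String)) : Decidable (Pre_parse_hash_tag post) := by
  unfold Pre_parse_hash_tag; infer_instance

def pvWitness_parse_hash_tag : (List (String × String)) :=
  [("content", "hi #tag and ##x"), ("title", "t")]

def Spec_parse_hash_tag (post : List (String × String)) (out : List (String × String)) : Prop := out = parse_hash_tag_alt post
instance (post : List (String × String)) (out : List (String × String)) : Decidable (Spec_parse_hash_tag post out) := by unfold Spec_parse_hash_tag; infer_instance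

-- ===== CLAIM (what is proved, stated in full; the proofs are below) =====
def Claim_equal_parse_hash_tag : Prop := ∀ (post : List (String × String)), Dom_parse_hash_tag post → Pre_parse_hash_tag post → Spec_parse_hash_tag post (parse_hash_tag post)

-- ===== LEMMAS AND PROOFS =====

-- A's per-word transformation, on the character level
def phtF (w : List Char) : List Char :=
  if PySem.Chars.startswith w ['#'] then
    "<a href=\"/tag/".toList ++ PySem.List.slice w (some 1) none ++ "\">".toList ++ w ++ "</a>".toList
  else w

-- structural model of split(" ")
def phtSplit : List Char → List (List Char)
  | [] => [[]]
  | c :: r => if c == ' ' then [] :: phtSplit r else (phtSplit r).modifyHead (c :: ·)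

def phtTail : List Char → List (List Char)
  | [] => []
  | _ :: r => phtSplit r

theorem phtSplit_ne_nil (cs : List Char) : phtSplit cs ≠ [] := by
  induction cs with
  | nil => simp [phtSplit]
  | cons c r ih =>
    simp only [phtSplit]
    split
    · simp
    · cases h : phtSplit r with
      | nil => exact absurd h ih
      | cons w ws => simp

theorem phtSplit_char (cs : List Char) :
    phtSplit cs = cs.takeWhile (· != ' ') :: phtTail (cs.dropWhile (· != ' ')) := by
  induction cs with
  | nil => simp [phtSplit, phtTail]
  | cons c r ih =>
    by_cases hc : c = ' '
    · subst hc; simp [phtSplit, phtTail, List.takeWhile, List.dropWhile]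
    · have hc' : (c != ' ') = true := by simp [hc]
      simp only [phtSplit, List.takeWhile_cons, List.dropWhile_cons, hc', if_pos, bne_iff_ne,
        ne_eq, hc, not_false_eq_true, ite_true, beq_iff_eq, ite_false, ih]
      simp

theorem phtSplitOn_go (fuel : Nat) (l cur : List Char) (acc2 : List (List Char))
    (h : l.length ≤ fuel) :
    PySem.Chars.splitOn.go [' '] fuel l cur (acc2) =
      acc2.reverse ++ (phtSplit l).modifyHead (cur.reverse ++ ·) := by
  induction fuel generalizing l cur acc2 with
  | zero =>
    have : l = [] := by cases l <;> simp_all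
    subst this
    simp [PySem.Chars.splitOn.go, phtSplit]
  | succ fuel ih =>
    cases l with
    | nil => simp [PySem.Chars.splitOn.go, phtSplit]
    | cons c rest =>
      by_cases hc : c = ' '
      · subst hc
        have hpre : [' '].isPrefixOf (' ' :: rest) = true := by simp [List.isPrefixOf]
        simp only [PySem.Chars.splitOn.go, hpre, if_pos]
        rw [show List.drop [' '].length (' ' :: rest) = rest from rfl]
        rw [ih rest [] (cur.reverse :: acc2) (by simpa using Nat.le_of_succ_le_succ h)]
        cases hr : phtSplit rest with
        | nil => exact absurd hr (phtSplit_ne_nil rest)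
        | cons w ws => simp [phtSplit, hr]
      · have hpre : [' '].isPrefixOf (c :: rest) = false := by
          simp [List.isPrefixOf]; exact fun hh => absurd hh.symm hc
        simp only [PySem.Chars.splitOn.go, hpre, Bool.false_eq_true, if_false]
        rw [ih rest (c :: cur) acc2 (by simpa using Nat.le_of_succ_le_succ h)]
        cases hr : phtSplit rest with
        | nil => exact absurd hr (phtSplit_ne_nil rest)
        | cons w ws =>
          have : (c == ' ') = false := by simp [hc]
          simp [phtSplit, hr, this]

theorem phtSplitOn_space (cs : List Char) :
    PySem.Chars.splitOn cs [' '] = phtSplit cs := by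
  rw [PySem.Chars.splitOn, phtSplitOn_go (cs.length + 1) cs [] [] (Nat.le_succ _)]
  cases hr : phtSplit cs with
  | nil => exact absurd hr (phtSplit_ne_nil cs)
  | cons w ws => simp

theorem phtF_hash (t : List Char) : phtF ('#' :: t) = phtAnchor t := by
  simp [phtF, phtAnchor, PySem.Chars.startswith, List.isPrefixOf,
    PySem.List.slice_from ('#' :: t) (by norm_num : (0:Int) ≤ 1)]

theorem phtF_not_hash (w : List Char) (h : w.head? ≠ some '#') : phtF w = w := by
  have : PySem.Chars.startswith w ['#'] = false := by
    cases w with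
    | nil => simp [PySem.Chars.startswith, List.isPrefixOf]
    | cons c r =>
      simp only [List.head?_cons, ne_eq, Option.some.injEq] at h
      simp [PySem.Chars.startswith, List.isPrefixOf]
      exact fun hh => absurd hh.symm h
  simp [phtF, this]

def phtTailMap : List (List Char) → List (List Char)
  | [] => []
  | w :: ws => w :: ws.map phtF

theorem phtJoin_cons_head (sep : List Char) (c : Char) (w : List Char) (l : List (List Char)) :
    PySem.Chars.join sep ((c :: w) :: l) = c :: PySem.Chars.join sep (w :: l) := by
  cases l with
  | nil => rw [PySem.Chars.join_singleton, PySem.Chars.join_singleton]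
  | cons q rest =>
    rw [PySem.Chars.join_cons_cons, PySem.Chars.join_cons_cons]
    simp

-- the heart: the single pass equals join-of-mapped-split
theorem phtScan_eq (cs : List Char) (st : Bool) :
    phtScan st cs =
      PySem.Chars.join [' ']
        (if st then (phtSplit cs).map phtF else phtTailMap (phtSplit cs)) := by
  induction hn : cs.length using Nat.strong_induction_on generalizing cs st with
  | _ n ih =>
  subst hn
  cases cs with
  | nil =>
    have h0 : phtF [] = [] := phtF_not_hash [] (by simp)
    cases st <;> simp [phtScan, phtSplit, phtTailMap, h0, PySem.Chars.join_singleton]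
  | cons c r =>
    by_cases hst : st = true ∧ c = '#'
    · obtain ⟨hst, hc⟩ := hst; subst hst; subst hc
      rw [phtScan]
      simp only [Bool.true_and, beq_self_eq_true, if_pos]
      have hsp : phtSplit ('#' :: r) = ('#' :: r.takeWhile (· != ' ')) :: phtTail (r.dropWhile (· != ' ')) := by
        rw [phtSplit_char ('#' :: r)]
        simp [List.takeWhile_cons, List.dropWhile_cons]
      rw [hsp]
      simp only [ite_true, List.map_cons, phtF_hash]
      cases hd : r.dropWhile (· != ' ') with
      | nil => simp [phtScan, phtTail, PySem.Chars.join_singleton]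
      | cons d r' =>
        have hd' : d = ' ' := by
          have := List.head?_dropWhile_not (· != ' ') r
          rw [hd] at this; simpa using this
        subst hd'
        rw [phtScan]
        simp only [Bool.false_and, Bool.false_eq_true, if_false, beq_self_eq_true]
        have hlen : r'.length < ('#' :: r).length := by
          have h1 : (' ' :: r').length ≤ r.length := hd ▸ List.length_dropWhile_le _ r
          simp only [List.length_cons] at h1 ⊢
          omega
        rw [ih r'.length hlen r' true rfl]
        simp only [phtTail, ite_true]
        cases hr' : (phtSplit r').map phtF with
        | nil => exact absurd (List.map_eq_nil_iff.mp hr') (phtSplit_ne_nil r')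
        | cons w ws =>
          rw [PySem.Chars.join_cons_cons]
          simp
    · -- else branch of the scan
      have hcond : (st && c == '#') = false := by
        cases st
        · rfl
        · simp only [Bool.true_and, beq_eq_false_iff_ne, ne_eq]
          intro hh; exact hst ⟨rfl, hh⟩
      rw [phtScan, hcond]
      simp only [Bool.false_eq_true, if_false]
      have hlen : r.length < (c :: r).length := by simp
      rw [ih r.length hlen r (c == ' ') rfl]
      by_cases hc : c = ' '
      · subst hc
        have hsp : phtSplit (' ' :: r) = [] :: phtSplit r := by simp [phtSplit]
        rw [hsp]
        simp only [beq_self_eq_true, ite_true]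
        have hF0 : phtF [] = [] := phtF_not_hash [] (by simp)
        cases hr : phtSplit r with
        | nil => exact absurd hr (phtSplit_ne_nil r)
        | cons w ws =>
          cases st <;>
            simp only [hr, ite_true, ite_false, Bool.false_eq_true, phtTailMap, List.map_cons,
              hF0, PySem.Chars.join_cons_cons, List.nil_append, List.singleton_append]
      · have hc' : (c == ' ') = false := by simp [hc]
        rw [hc']
        simp only [Bool.false_eq_true, if_false]
        have hsp : phtSplit (c :: r) = (phtSplit r).modifyHead (c :: ·) := by
          simp [phtSplit, hc]
        rw [hsp]
        cases hr : phtSplit r with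
        | nil => exact absurd hr (phtSplit_ne_nil r)
        | cons w ws =>
          have hmod : List.modifyHead (fun x => c :: x) (w :: ws) = (c :: w) :: ws := rfl
          cases st with
          | false =>
            simp only [hmod, ite_false, Bool.false_eq_true, phtTailMap, phtJoin_cons_head]
          | true =>
            have hFc : phtF (c :: w) = c :: w := by
              apply phtF_not_hash
              simp only [List.head?_cons, ne_eq, Option.some.injEq]
              intro hh; exact hst ⟨rfl, hh⟩
            simp only [hmod, ite_true, List.map_cons, hFc, phtTailMap, phtJoin_cons_head]

-- A's string-level word map equals phtF through toList
theorem phtF_str (w : List Char) :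
    (if PySem.Str.startswith (String.ofList w) "#" then
        "<a href=\"/tag/" ++ PySem.Str.slice (String.ofList w) (some 1) none ++ "\">" ++ (String.ofList w) ++ "</a>"
      else (String.ofList w)).toList = phtF w := by
  have hb : PySem.Str.startswith (String.ofList w) "#" = PySem.Chars.startswith w ['#'] := by
    simp [PySem.Str.startswith]
  by_cases h : PySem.Chars.startswith w ['#'] = true
  · simp [h, phtF, PySem.Str.toList_slice]
  · simp [phtF, h]

-- A's loop is a map
theorem pht_foldl_map {α : Type} (p : α → Bool) (f : α → α) (l : List α) :
    l.foldl (fun acc w => if p w then acc ++ [f w] else acc ++ [w]) [] =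
      l.map (fun w => if p w then f w else w) := by
  have he : (fun (acc : List α) w => if p w then acc ++ [f w] else acc ++ [w]) =
      (fun acc w => acc ++ [if p w then f w else w]) := by
    funext acc w; split <;> rfl
  rw [he, PySem.List.foldl_append_singleton_eq_map]
  simp

-- ===== VERDICT (by name: the statement is the Claim_ definition above) =====
theorem parse_hash_tag_spec : Claim_equal_parse_hash_tag := by
  intro post _ hpre
  unfold Spec_parse_hash_tag parse_hash_tag parse_hash_tag_alt
  cases hg : (PySem.Dict.ofList post).get? "content" with
  | none =>
    rw [Pre_parse_hash_tag, PySem.Dict.contains_eq_isSome_get?, hg] at hpre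
    simp at hpre
  | some content =>
    simp only [hg]
    refine congrArg (fun v => ((PySem.Dict.ofList post).insert "content" v).items) ?_
    apply String.toList_inj.mp
    rw [pht_foldl_map, PySem.Str.toList_join, phtSplitOn_space, phtScan_eq]
    simp only [ite_true, List.map_map, String.toList_ofList]
    rw [show " ".toList = [' '] from rfl]
    refine congrArg (PySem.Chars.join [' ']) (List.map_congr_left ?_).symm
    intro w _
    simpa using (phtF_str w).symm
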